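-- pv_equiv track=rewrite | github.com/TatyanaFilimonova/Basic-Algorithms | HW_8_kupa.py | minimize_cable_order_connection
-- ===== SOURCE A (Python) =====
-- import heapq
--
-- def minimize_cable_order_connection(cable_lengths):
--     heapq.heapify(cable_lengths)
--
--     costs = list()
--
--     while len(cable_lengths) > 1:
--         shortest1 = heapq.heappop(cable_lengths)
--         shortest2 = heapq.heappop(cable_lengths)
--         cost = shortest1 + shortest2
--         costs.append(cost)
--
--         heapq.heappush(cable_lengths, cost)
--
--     return costs
-- ===== SOURCE B (Python) =====
-- def minimize_cable_order_connection(cable_lengths):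
--     # sort once, then repeatedly merge the two front elements and
--     # re-insert the sum at its ordered position by a linear scan
--     q = sorted(cable_lengths)
--     costs = []
--     while len(q) > 1:
--         cost = q[0] + q[1]
--         costs.append(cost)
--         rest = q[2:]
--         k = 0
--         while k < len(rest) and rest[k] < cost:
--             k += 1
--         rest.insert(k, cost)
--         q = rest
--     return costs
-- ===== Notes on version B (the rewrite author's own statement) =====
-- stated objective: alternative
-- what changed: Replaces the binary-heap (heapq) merging loop by: sort the lengths once, then repeatedly merge the two front elements and re-insert the sum at its ordered position by a linear scan; B works on a copy, so unlike A it does not mutate the argument (return values are identical).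
import Mathlib
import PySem

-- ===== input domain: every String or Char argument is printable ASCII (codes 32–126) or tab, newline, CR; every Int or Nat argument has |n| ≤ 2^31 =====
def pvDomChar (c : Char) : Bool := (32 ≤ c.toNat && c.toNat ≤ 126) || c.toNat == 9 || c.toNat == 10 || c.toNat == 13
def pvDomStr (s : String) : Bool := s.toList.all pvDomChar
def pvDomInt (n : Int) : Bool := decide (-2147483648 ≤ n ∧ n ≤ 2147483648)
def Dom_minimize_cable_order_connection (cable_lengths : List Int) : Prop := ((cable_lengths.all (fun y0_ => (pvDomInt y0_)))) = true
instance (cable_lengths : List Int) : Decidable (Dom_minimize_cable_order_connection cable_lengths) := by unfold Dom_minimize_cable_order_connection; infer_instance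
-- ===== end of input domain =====

-- B replaces A's heapq loop by sort-once + merge-fronts with ordered re-insertion (alternative
-- algorithm, not faster); equivalence is about the RETURN value only: A mutates its argument
-- in place (heapify + pops leave it as [total] when it has ≥ 2 elements), B does not.

-- ===== PORT A =====
-- heapq.heappop returns the smallest element; on Int its observable value is the minimum of the
-- multiset, so the heap state is ported as the plain multiset (list) and pop as remove-first-minimum.
def pvAGo : Nat → List Int → List Int → List Int
  | 0, _, costs => costs
  | fuel+1, q, costs =>
    if q.length > 1 then
      match PySem.List.min? q (fun x => x) with
      | none => costs
      | some m1 =>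
        let q1 := (PySem.List.remove? q m1).getD q
        match PySem.List.min? q1 (fun x => x) with
        | none => costs
        | some m2 =>
          let q2 := (PySem.List.remove? q1 m2).getD q1
          pvAGo fuel (q2 ++ [m1 + m2]) (costs ++ [m1 + m2])
    else costs

def minimize_cable_order_connection (cable_lengths : List Int) : List Int :=
  pvAGo cable_lengths.length cable_lengths []

-- ===== PORT B =====
-- the linear scan `while k < len(rest) and rest[k] < cost` + insert, as a structural recursion
def pvInsert (cost : Int) : List Int → List Int
  | [] => [cost]
  | x :: xs => if x < cost then x :: pvInsert cost xs else cost :: x :: xs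

def pvBGo : Nat → List Int → List Int → List Int
  | 0, _, costs => costs
  | fuel+1, q, costs =>
    match q with
    | a :: b :: rest => pvBGo fuel (pvInsert (a + b) rest) (costs ++ [a + b])
    | _ => costs

def minimize_cable_order_connection_alt (cable_lengths : List Int) : List Int :=
  pvBGo cable_lengths.length (PySem.List.sorted cable_lengths (fun x => x) false) []

-- ===== PRECONDITION & SPEC =====
def Spec_minimize_cable_order_connection (cable_lengths : List Int) (out : List Int) : Prop := out = minimize_cable_order_connection_alt cable_lengths
instance (cable_lengths : List Int) (out : List Int) : Decidable (Spec_minimize_cable_order_connection cable_lengths out) := by unfold Spec_minimize_cable_order_connection; infer_instance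

-- ===== CLAIM (what is proved, stated in full; the proofs are below) =====
def Claim_equal_minimize_cable_order_connection : Prop := ∀ (cable_lengths : List Int), Dom_minimize_cable_order_connection cable_lengths → Spec_minimize_cable_order_connection cable_lengths (minimize_cable_order_connection cable_lengths)

-- ===== LEMMAS AND PROOFS =====

lemma pvInsert_eq_orderedInsert (c : Int) (l : List Int) :
    pvInsert c l = List.orderedInsert (· ≤ ·) c l := by
  induction l with
  | nil => rfl
  | cons x xs ih =>
      simp only [pvInsert, List.orderedInsert, ih]
      by_cases h : x < c
      · rw [if_pos h, if_neg (by omega)]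
      · rw [if_neg h, if_pos (by omega)]

lemma pvInsert_perm (c : Int) (l : List Int) : (pvInsert c l).Perm (c :: l) := by
  rw [pvInsert_eq_orderedInsert]; exact List.perm_orderedInsert _ c l

lemma pvInsert_pairwise (c : Int) (l : List Int) (h : l.Pairwise (· ≤ ·)) :
    (pvInsert c l).Pairwise (· ≤ ·) := by
  rw [pvInsert_eq_orderedInsert]
  exact List.Pairwise.orderedInsert (r := (· ≤ ·)) c l h

lemma min?_of_perm_sorted {q s : List Int} {a : Int} (hp : s.Perm q)
    (hh : a ∈ s) (hmin : ∀ y ∈ s, a ≤ y) :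
    PySem.List.min? q (fun x => x) = some a := by
  cases hm : PySem.List.min? q (fun x => x) with
  | none =>
      rw [PySem.List.min?_eq_none_iff] at hm
      subst hm
      exact absurd (hp.mem_iff.mp hh) (by simp)
  | some m =>
      have hmq : m ∈ q := PySem.List.min?_mem hm
      have hms : m ∈ s := hp.mem_iff.mpr hmq
      have h1 : a ≤ m := hmin m hms
      have h2 : (fun x => x) m ≤ (fun x => x) a :=
        PySem.List.min?_isMin hm a (hp.mem_iff.mp hh)
      simp only at h2
      have : m = a := le_antisymm h2 h1
      rw [this]

lemma pvGo_eq : ∀ (fuel : Nat) (q s costs : List Int), s.Perm q → s.Pairwise (· ≤ ·) →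
    pvAGo fuel q costs = pvBGo fuel s costs := by
  intro fuel
  induction fuel with
  | zero => intro q s costs _ _; rfl
  | succ fuel ih =>
      intro q s costs hp hs
      match s, hp with
      | [], hp =>
          have hq : q = [] := hp.symm.eq_nil
          subst hq; rfl
      | [a], hp =>
          have hlen : q.length = 1 := by simpa using hp.length_eq.symm
          simp [pvAGo, pvBGo, hlen]
      | a :: b :: rest, hp =>
          have hlen : q.length > 1 := by
            have := hp.length_eq; simp at this; omega
          -- a is the minimum of q
          have hpw := hs
          rw [List.pairwise_cons] at hpw
          obtain ⟨ha_le, hpw_tail⟩ := hpw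
          rw [List.pairwise_cons] at hpw_tail
          obtain ⟨hb_le, hpw_rest⟩ := hpw_tail
          have hab : a ≤ b := ha_le b (by simp)
          have hmin1 : PySem.List.min? q (fun x => x) = some a := by
            refine min?_of_perm_sorted hp (by simp) ?_
            intro y hy
            rcases List.mem_cons.mp hy with h | hy'
            · omega
            · exact ha_le y hy'
          have haq : a ∈ q := hp.mem_iff.mp (by simp)
          have hrem1 : PySem.List.remove? q a = some (q.erase a) :=
            PySem.List.remove?_eq_some_erase q a haq
          have hperm1 : (b :: rest).Perm (q.erase a) := by
            have := hp.erase a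
            simpa using this
          have hs1 : (b :: rest).Pairwise (· ≤ ·) := List.pairwise_cons.mpr ⟨hb_le, hpw_rest⟩
          have hmin2 : PySem.List.min? (q.erase a) (fun x => x) = some b := by
            refine min?_of_perm_sorted hperm1 (by simp) ?_
            intro y hy
            rcases List.mem_cons.mp hy with h | hy'
            · omega
            · exact hb_le y hy'
          have hbq1 : b ∈ q.erase a := hperm1.mem_iff.mp (by simp)
          have hrem2 : PySem.List.remove? (q.erase a) b = some ((q.erase a).erase b) :=
            PySem.List.remove?_eq_some_erase (q.erase a) b hbq1
          have hperm2 : rest.Perm ((q.erase a).erase b) := by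
            have := hperm1.erase b
            simpa using this
          -- unfold one step of each
          show (if q.length > 1 then _ else _) = pvBGo (fuel+1) (a :: b :: rest) costs
          rw [if_pos hlen, hmin1]
          simp only [hrem1, Option.getD_some, hmin2, hrem2]
          show pvAGo fuel (((q.erase a).erase b) ++ [a + b]) (costs ++ [a + b])
             = pvBGo fuel (pvInsert (a + b) rest) (costs ++ [a + b])
          apply ih
          · exact (pvInsert_perm _ _).trans
              ((List.perm_append_singleton _ _).symm.trans (hperm2.append_right _))
          · exact pvInsert_pairwise _ _ hpw_rest

-- ===== VERDICT (by name: the statement is the Claim_ definition above) =====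
theorem minimize_cable_order_connection_spec : Claim_equal_minimize_cable_order_connection := by
  intro l _
  unfold Spec_minimize_cable_order_connection minimize_cable_order_connection minimize_cable_order_connection_alt
  have hlen : (PySem.List.sorted l (fun x => x) false).length = l.length :=
    (PySem.List.sorted_perm l (fun x => x) false).length_eq
  rw [← hlen]
  exact pvGo_eq _ l _ [] (PySem.List.sorted_perm l (fun x => x) false)
    (PySem.List.sorted_pairwise l (fun x => x))
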